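-- pv_equiv track=rewrite | github.com/nesrv/EGE-2024 | Решу-ЕГЭ/20/79.py | f
-- ===== SOURCE A (Python) =====
-- def f(s, n, m):
--     if s >= 34 or n > 3:
--         return n == 3
--     if n == 0:
--         return f(s + 1, n + 1, 1) or f(s + 2, n + 1, 2) or f(s * 2, n + 1, 3)
--     if n == 1:
--         if m == 1:
--             return f(s + 2, n + 1, 2) and f(s * 2, n + 1, 3)
--         elif m == 2:
--             return f(s + 1, n + 1, 1) and f(s * 2, n + 1, 3)
--         return f(s + 1, n + 1, 1) and f(s + 2, n + 1, 2)
--     if n == 2: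
--         if m == 1:
--             return f(s + 2, n + 1, 2) or f(s * 2, n + 1, 3)
--         elif m == 2:
--             return f(s + 1, n + 1, 1) or f(s * 2, n + 1, 3)
--         return f(s + 1, n + 1, 1) or f(s + 2, n + 1, 2)
-- ===== SOURCE B (Python) =====
-- # B: two staged passes instead of direct recursion — a forward pass that
-- # materialises the bounded game tree level by level, then a backward-induction
-- # pass that folds minimax values up the explicit levels.
-- def f(s, n, m):
--     if s >= 34 or n > 3:
--         return n == 3
--     moves = ((1, lambda x: x + 1), (2, lambda x: x + 2), (3, lambda x: x * 2))
--     # forward pass: build the tree; a node is (state, label of move that reached it, parent index)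
--     levels = [(n, [(s, m if m in (1, 2) else 3, -1)])]
--     p = n
--     while p < 3:
--         kids = []
--         for i, (st, lb, _) in enumerate(levels[-1][1]):
--             if st < 34:
--                 banned = None if p == 0 else lb
--                 for label, mv in moves:
--                     if label != banned:
--                         kids.append((mv(st), label, i))
--         p += 1
--         levels.append((p, kids))
--     # backward pass: leaf values at ply 3, then minimax one level at a time
--     vals = [st >= 34 for st, _, _ in levels[-1][1]]
--     children = levels[-1][1]
--     for p, nodes in reversed(levels[:-1]):
--         comb = any if p % 2 == 0 else all
--         vals = [False if st >= 34 else
--                 comb(v for v, (_, _, par) in zip(vals, children) if par == i)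
--                 for i, (st, _, _) in enumerate(nodes)]
--         children = nodes
--     return vals[0]
-- ===== Notes on version B (the rewrite author's own statement) =====
-- stated objective: alternative
-- what changed: Replaces A's direct minimax recursion by two staged iterative passes: a forward pass that materialises the bounded game tree as explicit levels of (state, move label, parent index) nodes, then a backward-induction pass folding minimax values up those levels.
-- outside the precondition, e.g. on f(0, 3, 1): A returns None, B returns False; on f(0, 0, 0): A returns None, B returns False
import Mathlib
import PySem

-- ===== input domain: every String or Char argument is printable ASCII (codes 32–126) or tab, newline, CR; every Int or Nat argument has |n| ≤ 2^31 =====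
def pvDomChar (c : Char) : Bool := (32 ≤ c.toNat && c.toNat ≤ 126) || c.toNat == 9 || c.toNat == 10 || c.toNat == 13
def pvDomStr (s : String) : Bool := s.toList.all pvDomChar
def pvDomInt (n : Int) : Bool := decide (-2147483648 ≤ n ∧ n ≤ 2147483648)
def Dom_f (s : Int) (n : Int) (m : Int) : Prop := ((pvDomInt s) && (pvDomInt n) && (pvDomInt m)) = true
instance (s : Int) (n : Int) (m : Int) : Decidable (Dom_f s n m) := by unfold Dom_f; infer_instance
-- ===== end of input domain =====

-- B replaces A's direct minimax recursion by two staged iterative passes: a forward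
-- pass that materialises the bounded game tree level by level, then a backward
-- pass folding minimax values up those explicit levels (objective: alternative).

-- ===== PORT A =====
-- A's recursion is bounded: every call increments n and stops once n > 3, so it is
-- ported with a structural fuel of (4 - n).toNat steps (exhausted fuel can only be
-- reached with n > 3, where the Python guard returns n == 3 as well); the branch
-- structure is A's, line for line.
def fFuel (k : Nat) (s : Int) (n : Int) (m : Int) : Bool :=
  match k with
  | 0 => n == 3
  | k + 1 =>
    if s ≥ 34 ∨ n > 3 then n == 3
    else if n == 0 then fFuel k (s + 1) (n + 1) 1 || fFuel k (s + 2) (n + 1) 2 || fFuel k (s * 2) (n + 1) 3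
    else if n == 1 then
      if m == 1 then fFuel k (s + 2) (n + 1) 2 && fFuel k (s * 2) (n + 1) 3
      else if m == 2 then fFuel k (s + 1) (n + 1) 1 && fFuel k (s * 2) (n + 1) 3
      else fFuel k (s + 1) (n + 1) 1 && fFuel k (s + 2) (n + 1) 2
    else if n == 2 then
      if m == 1 then fFuel k (s + 2) (n + 1) 2 || fFuel k (s * 2) (n + 1) 3
      else if m == 2 then fFuel k (s + 1) (n + 1) 1 || fFuel k (s * 2) (n + 1) 3
      else fFuel k (s + 1) (n + 1) 1 || fFuel k (s + 2) (n + 1) 2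
    -- Python falls through here and returns None (not a bool); excluded by Pre_f
    else false

def f (s : Int) (n : Int) (m : Int) : Bool := fFuel (4 - n).toNat s n m

-- ===== PORT B =====
-- A node is (state, label of the move that reached it, parent index); levels are
-- kept newest-first, so the Python backward iteration reversed(levels[:-1]) is the
-- tail of the accumulated list. The `while p < 3` loop runs (3 - n).toNat times.
def f_alt (s : Int) (n : Int) (m : Int) : Bool :=
  if s ≥ 34 ∨ n > 3 then n == 3
  else
    let moves : List (Int × (Int → Int)) := [(1, fun x => x + 1), (2, fun x => x + 2), (3, fun x => x * 2)]
    -- forward pass: build the tree level by level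
    let step : (List (Int × List (Int × Int × Int)) × Int) → (List (Int × List (Int × Int × Int)) × Int) :=
      fun acc =>
        let lvls := acc.1
        let p := acc.2
        let cur := (lvls.headD (p, [])).2
        let kids := (PySem.List.enumerate cur).foldl (fun kids inode =>
          let i := inode.1
          let st := inode.2.1
          let lb := inode.2.2.1
          if st < 34 then
            let banned : Option Int := if p == 0 then none else some lb
            moves.foldl (fun ks lm => if some lm.1 != banned then ks ++ [(lm.2 st, lm.1, i)] else ks) kids
          else kids) []
        ((p + 1, kids) :: lvls, p + 1)
    let lvlsRev := ((List.range (3 - n).toNat).foldl (fun acc _ => step acc) ([(n, [(s, if m == 1 || m == 2 then m else 3, -1)])], n)).1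
    -- backward pass: leaf values at the deepest level, then minimax one level at a time
    let deepest := (lvlsRev.headD (n, [])).2
    let vals0 := deepest.map (fun nd => decide (nd.1 ≥ 34))
    let vals := (lvlsRev.tail.foldl (fun (acc : List Bool × List (Int × Int × Int)) pl =>
        let vals := acc.1
        let children := acc.2
        let p := pl.1
        let nodes := pl.2
        let newvals := (PySem.List.enumerate nodes).map (fun inode =>
          if inode.2.1 ≥ 34 then false
          else
            let kidvals := ((vals.zip children).filter (fun vc => vc.2.2.2 == inode.1)).map Prod.fst
            if PySem.Int.mod p 2 == 0 then kidvals.any id else kidvals.all id)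
        (newvals, nodes)) (vals0, deepest)).1
    vals.headD false  -- Python vals[0]; the root level always has one node

-- ===== PRECONDITION & SPEC =====
-- Pre_f excludes exactly the inputs on which Python A falls through its branch
-- ladder (or its or/and chain propagates such a fallthrough) and returns None
-- instead of a bool.
def Pre_f (s : Int) (n : Int) (m : Int) : Prop :=
  s ≥ 34 ∨ n > 3 ∨ (n = 0 ∧ s ≥ 8) ∨ (n = 1 ∧ s ≥ 16) ∨
    (n = 2 ∧ (((m = 1 ∨ m = 2) ∧ s ≥ 17) ∨ s ≥ 32))
instance (s : Int) (n : Int) (m : Int) : Decidable (Pre_f s n m) := by unfold Pre_f; infer_instance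
def pvWitness_f : Int × Int × Int := (8, 0, 0)

def Spec_f (s : Int) (n : Int) (m : Int) (out : Bool) : Prop := out = f_alt s n m
instance (s : Int) (n : Int) (m : Int) (out : Bool) : Decidable (Spec_f s n m out) := by unfold Spec_f; infer_instance

-- ===== CLAIM (what is proved, stated in full; the proofs are below) =====
def Claim_equal_f : Prop := ∀ (s : Int) (n : Int) (m : Int), Dom_f s n m → Pre_f s n m → Spec_f s n m (f s n m)

-- ===== LEMMAS AND PROOFS =====

-- ===== VERDICT (by name: the statement is the Claim_ definition above) =====
theorem f_spec : Claim_equal_f := by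
  unfold Claim_equal_f Spec_f
  intro s n m _ hp
  by_cases hb : s ≥ 34 ∨ n > 3
  · have h3 : f s n m = (n == 3) := by
      unfold f fFuel
      rcases Nat.eq_zero_or_pos (4 - n).toNat with h | h
      · simp [h]
      · obtain ⟨k, hk⟩ := Nat.exists_eq_succ_of_ne_zero (Nat.pos_iff_ne_zero.mp h)
        simp [hk, hb]
    conv_rhs => rw [f_alt.eq_def]
    simp [hb, h3]
  · have hs : s ≤ 33 := by omega
    have hrange : (n = 0 ∧ 8 ≤ s) ∨ (n = 1 ∧ 16 ≤ s) ∨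
        (n = 2 ∧ (((m = 1 ∨ m = 2) ∧ 17 ≤ s) ∨ 32 ≤ s)) := by
      rcases hp with h | h | h | h | h <;> omega
    by_cases h1 : m = 1
    · subst h1
      rcases hrange with ⟨hn, hlo⟩ | ⟨hn, hlo⟩ | ⟨hn, hc⟩ <;> subst hn <;>
        [skip; skip; (have hlo : 17 ≤ s := by omega)] <;> interval_cases s <;> decide
    · by_cases h2 : m = 2
      · subst h2
        rcases hrange with ⟨hn, hlo⟩ | ⟨hn, hlo⟩ | ⟨hn, hc⟩ <;> subst hn <;>
          [skip; skip; (have hlo : 17 ≤ s := by omega)] <;> interval_cases s <;> decide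
      · have e1 : (m == (1 : Int)) = false := by simp [h1]
        have e2 : (m == (2 : Int)) = false := by simp [h2]
        rcases hrange with ⟨hn, hlo⟩ | ⟨hn, hlo⟩ | ⟨hn, hc⟩ <;> subst hn <;>
          [skip; skip; (have hlo : 32 ≤ s := by omega)] <;> interval_cases s <;>
          · unfold f fFuel
            conv_rhs => rw [f_alt.eq_def]
            simp only [e1, e2, Bool.or_self, Bool.false_eq_true, if_false]
            decide
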